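-- pv_equiv track=rewrite | github.com/nbbl/advent-of-code-2023 | lukas/day-1/challenge.py | tokens_to_ints
-- ===== SOURCE A (Python) =====
-- from typing import List
--
-- corpus = [
--     "1", "2", "3", "4", "5", "6", "7", "8", "9",
--     "one", "two", "three", "four", "five", "six", "seven", "eight", "nine",
-- ]
--
-- def tokens_to_ints(tokens: List[str]) -> List[int]:
--     """
--     Extracts first and last int using corpus
--
--     :param tokens:
--     :return:
--     """
--     ints = []
--     for token in tokens:
--         try:
--             integer = int(token)
--             ints.append(integer)
--         except ValueError:
--             ints.append(corpus.index(token) - 8)  # ¯\_(ツ)_/¯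
--         except Exception as e:
--             raise Exception(f"Unknown error: {e}")
--     if len(ints) == 1:  # Special case for only single digit
--         ints.append(ints[0])
--     elif len(ints) > 2:
--         del ints[1:-1]  # Remove everything except first and last list items
--     return ints
-- ===== SOURCE B (Python) =====
-- from typing import List
--
-- corpus = [
--     "1", "2", "3", "4", "5", "6", "7", "8", "9",
--     "one", "two", "three", "four", "five", "six", "seven", "eight", "nine",
-- ]
--
-- # value of every corpus token, built once: position i holds value i % 9 + 1
-- _VALUE = {token: i % 9 + 1 for i, token in enumerate(corpus)}
--
-- def _to_int(token: str) -> int: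
--     return _VALUE[token] if token in _VALUE else int(token)
--
-- def tokens_to_ints(tokens: List[str]) -> List[int]:
--     if not tokens:
--         return []
--     # only the first and last tokens ever survive A's post-processing,
--     # so convert just those two
--     return [_to_int(tokens[0]), _to_int(tokens[-1])]
-- ===== Notes on version B (the rewrite author's own statement) =====
-- stated objective: faster
-- what changed: B never iterates over the list: it converts only tokens[0] and tokens[-1] via a corpus-value table built once, instead of A's loop that converts every token (scanning the corpus with list.index for words) and then deletes the middle slice.
-- crash fix: On lists of length >= 3 whose first and last tokens are convertible but some middle token is neither an int literal nor a corpus word, A raises ValueError while B returns [first, last]. — e.g. on tokens_to_ints(["1", "x", "2"]): A raises ValueError, B returns [1, 2]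
import Mathlib
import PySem

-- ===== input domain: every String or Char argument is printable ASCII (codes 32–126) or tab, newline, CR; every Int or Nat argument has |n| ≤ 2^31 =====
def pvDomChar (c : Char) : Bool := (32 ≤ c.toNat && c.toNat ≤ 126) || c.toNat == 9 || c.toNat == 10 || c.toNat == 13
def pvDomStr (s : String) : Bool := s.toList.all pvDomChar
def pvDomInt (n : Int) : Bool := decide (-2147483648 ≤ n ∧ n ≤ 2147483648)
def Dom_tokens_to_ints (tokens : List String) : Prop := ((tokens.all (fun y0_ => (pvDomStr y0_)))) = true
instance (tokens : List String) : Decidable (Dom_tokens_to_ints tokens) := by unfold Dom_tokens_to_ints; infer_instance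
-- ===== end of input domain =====

-- B converts only tokens[0] and tokens[-1] via a corpus-value table (no pass over the list),
-- instead of A's loop converting every token followed by `del ints[1:-1]`; objective: faster.


-- ===== PORT A =====
def pvCorpus : List String :=
  ["1", "2", "3", "4", "5", "6", "7", "8", "9",
   "one", "two", "three", "four", "five", "six", "seven", "eight", "nine"]

-- one iteration's appended value: int(token), or on ValueError corpus.index(token) - 8
-- (corpus.index raising ValueError = index? none is excluded by Pre_; .getD 0 only for totality)
def pvConvA (token : String) : Int :=
  match PySem.Int.ofStr? token with
  | some n => n
  | none => (((PySem.List.index? pvCorpus token).getD 0 : Nat) : Int) - 8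

def tokens_to_ints (tokens : List String) : List Int :=
  let ints := tokens.foldl (fun ints token => ints ++ [pvConvA token]) []
  if ints.length = 1 then ints ++ [ints.getD 0 0]         -- special case for only single digit
  else if ints.length > 2 then
    -- del ints[1:-1]: exact for length > 2 (the branch guard)
    ints.take 1 ++ ints.drop (ints.length - 1)
  else ints

-- ===== PORT B =====
-- _VALUE = {token: i % 9 + 1 for i, token in enumerate(corpus)}
def pvValue : PySem.Dict String Int :=
  PySem.Dict.ofList [("1", 1), ("2", 2), ("3", 3), ("4", 4), ("5", 5), ("6", 6), ("7", 7),
                     ("8", 8), ("9", 9), ("one", 1), ("two", 2), ("three", 3), ("four", 4),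
                     ("five", 5), ("six", 6), ("seven", 7), ("eight", 8), ("nine", 9)]

-- _VALUE[token] if token in _VALUE else int(token)  (int() ValueError excluded by Pre_; .getD 0 for totality)
def pvToInt (token : String) : Int :=
  if PySem.Dict.contains pvValue token then (PySem.Dict.get? pvValue token).getD 0
  else (PySem.Int.ofStr? token).getD 0

def tokens_to_ints_alt (tokens : List String) : List Int :=
  match tokens with
  | [] => []
  | t :: _ => [pvToInt t, pvToInt (PySem.List.pyGetD tokens (-1) "")]  -- tokens[-1]; nonempty here

-- ===== PRECONDITION & SPEC =====
-- Pre_ excludes exactly the tokens on which A raises ValueError: a token neither int()-parseable nor in the corpus.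
def pvConvertible (t : String) : Bool := (PySem.Int.ofStr? t).isSome || pvCorpus.contains t
def Pre_tokens_to_ints (tokens : List String) : Prop :=
  (tokens.all pvConvertible) = true
instance (tokens : List String) : Decidable (Pre_tokens_to_ints tokens) := by
  unfold Pre_tokens_to_ints; infer_instance
def pvWitness_tokens_to_ints : List String := ["one", " 7 ", "nine"]

-- On lists of length ≥ 3 whose first and last tokens are convertible but some middle token is
-- neither an int literal nor a corpus word, A raises ValueError while B returns [first, last].
def Raises_tokens_to_ints (tokens : List String) : Prop :=
  3 ≤ tokens.length ∧ pvConvertible (tokens.headD "") = true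
    ∧ pvConvertible (tokens.getLastD "") = true ∧ ¬ (tokens.all pvConvertible) = true
instance (tokens : List String) : Decidable (Raises_tokens_to_ints tokens) := by
  unfold Raises_tokens_to_ints; infer_instance
def pvRaiseWitness_tokens_to_ints : List String := ["1", "x", "2"]
def pvRaiseWitnessOut_tokens_to_ints : List Int := [1, 2]

def Spec_tokens_to_ints (tokens : List String) (out : List Int) : Prop := out = tokens_to_ints_alt tokens
instance (tokens : List String) (out : List Int) : Decidable (Spec_tokens_to_ints tokens out) := by
  unfold Spec_tokens_to_ints; infer_instance

-- ===== CLAIM (what is proved, stated in full; the proofs are below) =====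
def Claim_equal_tokens_to_ints : Prop := ∀ (tokens : List String), Dom_tokens_to_ints tokens → Pre_tokens_to_ints tokens → Spec_tokens_to_ints tokens (tokens_to_ints tokens)
def Claim_raises_tokens_to_ints : Prop := (∀ (tokens : List String), Dom_tokens_to_ints tokens → Raises_tokens_to_ints tokens → ¬ Pre_tokens_to_ints tokens) ∧ (Dom_tokens_to_ints (pvRaiseWitness_tokens_to_ints) ∧ Raises_tokens_to_ints (pvRaiseWitness_tokens_to_ints) ∧ tokens_to_ints_alt (pvRaiseWitness_tokens_to_ints) = pvRaiseWitnessOut_tokens_to_ints)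

-- ===== LEMMAS AND PROOFS =====

-- the two per-token conversions agree on tokens A accepts
theorem pvConv_agree (t : String) (h : pvConvertible t = true) :
    pvConvA t = pvToInt t := by
  by_cases hc : t ∈ pvCorpus
  · have : t ∈ pvCorpus := hc
    simp only [pvCorpus, List.mem_cons, List.not_mem_nil, or_false] at this
    rcases this with rfl|rfl|rfl|rfl|rfl|rfl|rfl|rfl|rfl|rfl|rfl|rfl|rfl|rfl|rfl|rfl|rfl|rfl <;> decide
  · have hs : (PySem.Int.ofStr? t).isSome = true := by
      unfold pvConvertible at h
      rcases Bool.or_eq_true_iff.mp h with h' | h'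
      · exact h'
      · exact absurd ((List.contains_iff_mem).mp h') hc
    have hnc : PySem.Dict.contains pvValue t = false := by
      rw [PySem.Dict.contains_eq_decide_mem_keys]
      have hk : pvValue.keys = pvCorpus := by decide
      rw [hk]
      simpa using hc
    obtain ⟨n, hn⟩ := Option.isSome_iff_exists.mp hs
    simp [pvConvA, pvToInt, hn, hnc]

theorem pvFoldA (tokens : List String) (acc : List Int) :
    tokens.foldl (fun ints token => ints ++ [pvConvA token]) acc = acc ++ tokens.map pvConvA := by
  induction tokens generalizing acc with
  | nil => simp
  | cons t ts ih => simp [List.foldl_cons, ih]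

theorem pvDropLast (l : List Int) (h : l ≠ []) :
    l.drop (l.length - 1) = [l.getLast h] := by
  induction l with
  | nil => exact absurd rfl h
  | cons a rest ih =>
      cases rest with
      | nil => simp
      | cons b r =>
          have hne : (b :: r : List Int) ≠ [] := by simp
          have : (a :: b :: r).length - 1 = ((b :: r).length - 1) + 1 := by
            simp [List.length_cons]
          rw [this, List.drop_succ_cons, ih hne, List.getLast_cons hne]

-- A's post-processing of the full converted list keeps exactly first and last
theorem pvFinish (vals : List Int) (h : vals ≠ []) :
    (if vals.length = 1 then vals ++ [vals.getD 0 0]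
     else if vals.length > 2 then vals.take 1 ++ vals.drop (vals.length - 1)
     else vals)
    = [vals.headD 0, vals.getLastD 0] := by
  match vals with
  | [a] => simp
  | [a, b] => simp
  | a :: b :: c :: rest =>
      have hne : (a :: b :: c :: rest : List Int) ≠ [] := by simp
      have hlen : (a :: b :: c :: rest).length > 2 := by simp [List.length_cons]
      have h1 : (a :: b :: c :: rest).length ≠ 1 := by omega
      rw [if_neg h1, if_pos hlen, pvDropLast _ hne]
      simp [List.getLastD_eq_getLast?, List.getLast?_eq_some_getLast hne]

-- ===== VERDICT (by name: the statement is the Claim_ definition above) =====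
theorem tokens_to_ints_spec : Claim_equal_tokens_to_ints := by
  intro tokens _ hpre
  unfold Spec_tokens_to_ints tokens_to_ints tokens_to_ints_alt
  cases tokens with
  | nil => simp
  | cons t ts =>
      have hall := fun x hx => List.all_eq_true.mp hpre x hx
      have hne : (t :: ts : List String) ≠ [] := by simp
      rw [pvFoldA, List.nil_append, pvFinish _ (by simp)]
      have hL := List.getLast_mem hne
      show _ = [pvToInt t, pvToInt (PySem.List.pyGetD (t :: ts) (-1) "")]
      rw [PySem.List.pyGetD_neg_one (h := hne)]
      have h1 : ((t :: ts).map pvConvA).headD 0 = pvConvA t := by simp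
      have h2 : ((t :: ts).map pvConvA).getLastD 0 = pvConvA ((t :: ts).getLast hne) := by
        rw [List.getLastD_eq_getLast?, List.getLast?_map,
            List.getLast?_eq_some_getLast hne]
        rfl
      rw [h1, h2, pvConv_agree t (hall t (by simp)),
          pvConv_agree _ (hall _ hL)]

@[simp] theorem tokens_to_ints_raises : Claim_raises_tokens_to_ints := by
  unfold Claim_raises_tokens_to_ints
  exact ⟨fun tokens _ hr hp => hr.2.2.2 hp, by decide⟩
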